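-- pv_equiv track=rewrite | github.com/chienlax/youtube_download | downloader_app.py | parse_subtitle_info
-- ===== SOURCE A (Python) =====
-- def parse_subtitle_info(output):
--     """Parse the subtitle information from yt-dlp --list-subs output"""
--     subtitle_info = {"manual": [], "auto": []}
--
--     # Extract available subtitles
--     manual_section = False
--     auto_section = False
--
--     for line in output.splitlines():
--         line = line.strip()
--
--         if "Available subtitles for" in line:
--             manual_section = True
--             continue
--
--         if "Available automatic captions for" in line:
--             manual_section = False
--             auto_section = True
--             continue
--
--         # Parse language entries
--         if manual_section or auto_section:
--             # Format is typically: "en    English"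
--             parts = line.split()
--             if len(parts) >= 2 and len(parts[0]) <= 5:  # Language codes are usually short
--                 lang_code = parts[0]
--                 lang_name = " ".join(parts[1:])
--
--                 if manual_section:
--                     subtitle_info["manual"].append({"code": lang_code, "name": lang_name})
--                 elif auto_section:
--                     subtitle_info["auto"].append({"code": lang_code, "name": lang_name})
--
--     return subtitle_info
-- ===== SOURCE B (Python) =====
-- MANUAL_HEADER = "Available subtitles for"
-- AUTO_HEADER = "Available automatic captions for"
--
--
-- def _label_of(line):
--     line = line.strip()
--     if MANUAL_HEADER in line:
--         return "manual"
--     if AUTO_HEADER in line: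
--         return "auto"
--     return None
--
--
-- def parse_subtitle_info(output):
--     """Split the output into header-labelled sections, then parse each
--     section's lines with one uniform entry rule."""
--     lines = output.splitlines()
--     n = len(lines)
--     # Pass 1: cut the line list into (label, body) sections; lines before
--     # the first header belong to no section and are ignored.
--     sections = []
--     i = 0
--     while i < n:
--         label = _label_of(lines[i])
--         i += 1
--         if label is None:
--             continue
--         body = []
--         while i < n and _label_of(lines[i]) is None:
--             body.append(lines[i])
--             i += 1
--         sections.append((label, body))
--     # Pass 2: uniform entry rule per section.
--     info = {"manual": [], "auto": []}
--     for label, body in sections: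
--         for line in body:
--             parts = line.strip().split()
--             if len(parts) >= 2 and len(parts[0]) <= 5:
--                 info[label].append({"code": parts[0], "name": " ".join(parts[1:])})
--     return info
-- ===== Notes on version B (the rewrite author's own statement) =====
-- stated objective: alternative
-- what changed: Replaces A's single pass that threads two boolean section flags through every line by a two-phase decomposition: a sectioning pass that cuts the line list at the header lines into (label, body) sections, then one uniform entry rule applied per section.
import Mathlib
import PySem

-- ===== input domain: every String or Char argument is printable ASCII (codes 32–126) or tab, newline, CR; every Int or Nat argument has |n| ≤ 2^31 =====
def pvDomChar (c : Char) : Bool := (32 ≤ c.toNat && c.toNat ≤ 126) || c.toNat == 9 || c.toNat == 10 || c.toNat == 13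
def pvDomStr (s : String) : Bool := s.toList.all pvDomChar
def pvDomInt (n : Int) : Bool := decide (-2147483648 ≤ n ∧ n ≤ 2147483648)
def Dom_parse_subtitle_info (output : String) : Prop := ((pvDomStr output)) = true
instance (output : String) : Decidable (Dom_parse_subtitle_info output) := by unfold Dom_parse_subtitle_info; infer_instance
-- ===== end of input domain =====

-- B replaces A's per-line two-flag state machine by an explicit sectioning pass
-- (cut the lines at the header lines) followed by one uniform per-section entry
-- parse; objective: alternative decomposition, same cost.

-- ===== PORT A =====
-- A's single loop over the lines, carrying the two flags and the two lists.
def pvALoop : List String → Bool → Bool →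
    List (List (String × String)) → List (List (String × String)) →
    List (List (String × String)) × List (List (String × String))
  | [], _m, _a, ml, al => (ml, al)
  | l :: ls, m, a, ml, al =>
    let line := PySem.Str.strip l
    if PySem.Str.isIn "Available subtitles for" line then
      pvALoop ls true a ml al
    else if PySem.Str.isIn "Available automatic captions for" line then
      pvALoop ls false true ml al
    else if m || a then
      match PySem.Str.split₀ line with
      | p0 :: p1 :: rest =>
        if PySem.Str.len p0 ≤ 5 then
          let entry := [("code", p0), ("name", PySem.Str.join " " (p1 :: rest))]
          if m then pvALoop ls m a (ml ++ [entry]) al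
          else pvALoop ls m a ml (al ++ [entry])
        else pvALoop ls m a ml al
      | _ => pvALoop ls m a ml al
    else pvALoop ls m a ml al

def parse_subtitle_info (output : String) : List (String × List (List (String × String))) :=
  let r := pvALoop (PySem.Str.splitlines output) false false [] []
  [("manual", r.1), ("auto", r.2)]

-- ===== PORT B =====
def pvLabelOf (l : String) : Option String :=
  let line := PySem.Str.strip l
  if PySem.Str.isIn "Available subtitles for" line then some "manual"
  else if PySem.Str.isIn "Available automatic captions for" line then some "auto"
  else none

-- Pass 1 of B: cut the line list into (label, body) sections.
def pvSections : List String → List (String × List String)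
  | [] => []
  | l :: ls =>
    match pvLabelOf l with
    | none => pvSections ls
    | some lab =>
      (lab, ls.takeWhile (fun x => (pvLabelOf x).isNone)) ::
        pvSections (ls.dropWhile (fun x => (pvLabelOf x).isNone))
termination_by ls => ls.length
decreasing_by
  · simp
  · have := List.length_dropWhile_le (fun x => (pvLabelOf x).isNone) ls
    simp; omega

-- B's uniform entry rule.
def pvEntryB? (l : String) : Option (List (String × String)) :=
  match PySem.Str.split₀ (PySem.Str.strip l) with
  | p0 :: p1 :: rest =>
    if PySem.Str.len p0 ≤ 5 then
      some [("code", p0), ("name", PySem.Str.join " " (p1 :: rest))]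
    else none
  | _ => none

-- Pass 2 of B: per section, append the section's entries to its bucket.
def pvBLoop : List (String × List String) →
    List (List (String × String)) → List (List (String × String)) →
    List (List (String × String)) × List (List (String × String))
  | [], ml, al => (ml, al)
  | (lab, body) :: secs, ml, al =>
    let step := fun (acc : List (List (String × String))) (line : String) =>
      match pvEntryB? line with
      | some e => acc ++ [e]
      | none => acc
    if lab = "manual" then pvBLoop secs (body.foldl step ml) al
    else pvBLoop secs ml (body.foldl step al)

def parse_subtitle_info_alt (output : String) : List (String × List (List (String × String))) :=
  let r := pvBLoop (pvSections (PySem.Str.splitlines output)) [] []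
  [("manual", r.1), ("auto", r.2)]

-- ===== PRECONDITION & SPEC =====
def Spec_parse_subtitle_info (output : String) (out : List (String × List (List (String × String)))) : Prop := out = parse_subtitle_info_alt output
instance (output : String) (out : List (String × List (List (String × String)))) : Decidable (Spec_parse_subtitle_info output out) := by unfold Spec_parse_subtitle_info; infer_instance

-- ===== CLAIM (what is proved, stated in full; the proofs are below) =====
def Claim_equal_parse_subtitle_info : Prop := ∀ (output : String), Dom_parse_subtitle_info output → Spec_parse_subtitle_info output (parse_subtitle_info output)

-- ===== LEMMAS AND PROOFS =====

-- Entries of a line list going to bucket b, given the current section label.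
def pvE (b : String) : Option String → List String → List (List (String × String))
  | _lab, [] => []
  | lab, l :: ls =>
    match pvLabelOf l with
    | some lab' => pvE b (some lab') ls
    | none =>
      (if lab = some b then (pvEntryB? l).toList else []) ++ pvE b lab ls

def pvStateLab (m a : Bool) : Option String :=
  if m then some "manual" else if a then some "auto" else none

-- A's loop computes exactly the bucket entries under the "most recent header" labelling.
theorem pvALoop_eq (ls : List String) : ∀ (m a : Bool)
    (ml al : List (List (String × String))),
    pvALoop ls m a ml al =
      (ml ++ pvE "manual" (pvStateLab m a) ls, al ++ pvE "auto" (pvStateLab m a) ls) := by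
  induction ls with
  | nil => intro m a ml al; simp [pvALoop, pvE]
  | cons l ls ih =>
    intro m a ml al
    by_cases h1 : PySem.Str.isIn "Available subtitles for" (PySem.Str.strip l) = true
    · have hl : pvLabelOf l = some "manual" := by
        simp only [pvLabelOf]; rw [if_pos h1]
      simp only [pvALoop, h1, if_pos, ih]
      simp [pvE, hl, pvStateLab]
    · by_cases h2 : PySem.Str.isIn "Available automatic captions for" (PySem.Str.strip l) = true
      · have hl : pvLabelOf l = some "auto" := by
          simp only [pvLabelOf]; rw [if_neg h1, if_pos h2]
        simp only [pvALoop, h1, h2, if_neg, if_pos, Bool.false_eq_true, not_false_iff, ih]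
        simp [pvE, hl, pvStateLab]
      · have hl : pvLabelOf l = none := by
          simp only [pvLabelOf]; rw [if_neg h1, if_neg h2]
        match m, a with
        | false, false =>
          simp only [pvALoop, h1, h2, Bool.false_eq_true, not_false_iff, if_neg,
            Bool.or_self, ih]
          simp [pvE, hl, pvStateLab]
        | true, a =>
          simp only [pvALoop, h1, h2, Bool.false_eq_true, not_false_iff, if_neg,
            Bool.true_or, if_true]
          rcases hsp : PySem.Str.split₀ (PySem.Str.strip l) with _ | ⟨p0, _ | ⟨p1, rest⟩⟩
          · have hent : pvEntryB? l = none := by simp only [pvEntryB?]; rw [hsp]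
            simp only [ih]
            simp [pvE, hl, pvStateLab, hent]
          · have hent : pvEntryB? l = none := by simp only [pvEntryB?]; rw [hsp]
            simp only [ih]
            simp [pvE, hl, pvStateLab, hent]
          · by_cases hlen : PySem.Str.len p0 ≤ 5
            · have hent : pvEntryB? l =
                  some [("code", p0), ("name", PySem.Str.join " " (p1 :: rest))] := by
                simp only [pvEntryB?]; rw [hsp]; exact if_pos hlen
              simp only [hlen, if_true, ih]
              simp [pvE, hl, pvStateLab, hent]
            · have hent : pvEntryB? l = none := by
                simp only [pvEntryB?]; rw [hsp]; exact if_neg hlen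
              simp only [hlen, if_false, ih]
              simp [pvE, hl, pvStateLab, hent]
        | false, true =>
          simp only [pvALoop, h1, h2, Bool.false_eq_true, not_false_iff, if_neg,
            Bool.false_or, if_true]
          rcases hsp : PySem.Str.split₀ (PySem.Str.strip l) with _ | ⟨p0, _ | ⟨p1, rest⟩⟩
          · have hent : pvEntryB? l = none := by simp only [pvEntryB?]; rw [hsp]
            simp only [ih]
            simp [pvE, hl, pvStateLab, hent]
          · have hent : pvEntryB? l = none := by simp only [pvEntryB?]; rw [hsp]
            simp only [ih]
            simp [pvE, hl, pvStateLab, hent]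
          · by_cases hlen : PySem.Str.len p0 ≤ 5
            · have hent : pvEntryB? l =
                  some [("code", p0), ("name", PySem.Str.join " " (p1 :: rest))] := by
                simp only [pvEntryB?]; rw [hsp]; exact if_pos hlen
              simp only [hlen, if_true, ih]
              simp [pvE, hl, pvStateLab, hent]
            · have hent : pvEntryB? l = none := by
                simp only [pvEntryB?]; rw [hsp]; exact if_neg hlen
              simp only [hlen, if_false, ih]
              simp [pvE, hl, pvStateLab, hent]

-- A fold of the conditional-append step is an append of filterMap.
theorem pvFoldl_step (body : List String) : ∀ (acc : List (List (String × String))),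
    body.foldl (fun acc line =>
      match pvEntryB? line with
      | some e => acc ++ [e]
      | none => acc) acc = acc ++ body.filterMap pvEntryB? := by
  induction body with
  | nil => intro acc; simp
  | cons l body ih =>
    intro acc
    simp only [List.foldl_cons, List.filterMap_cons]
    cases h : pvEntryB? l <;> simp [ih]

-- Bucket b's content from a section list.
def pvC (b : String) : List (String × List String) → List (List (String × String))
  | [] => []
  | (lab, body) :: secs =>
    (if lab = b then body.filterMap pvEntryB? else []) ++ pvC b secs

theorem pvBLoop_eq (secs : List (String × List String))
    (h : ∀ s ∈ secs, s.1 = "manual" ∨ s.1 = "auto") :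
    ∀ (ml al : List (List (String × String))),
    pvBLoop secs ml al = (ml ++ pvC "manual" secs, al ++ pvC "auto" secs) := by
  induction secs with
  | nil => intro ml al; simp [pvBLoop, pvC]
  | cons s secs ih =>
    obtain ⟨lab, body⟩ := s
    intro ml al
    have hrest : ∀ s ∈ secs, s.1 = "manual" ∨ s.1 = "auto" :=
      fun s hs => h s (List.mem_cons_of_mem _ hs)
    rcases h (lab, body) List.mem_cons_self with h' | h' <;> subst h' <;>
      simp [pvBLoop, pvC, ih hrest, pvFoldl_step]

theorem pvSections_labels (ls : List String) :
    ∀ s ∈ pvSections ls, s.1 = "manual" ∨ s.1 = "auto" := by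
  induction ls using pvSections.induct with
  | case1 => simp [pvSections]
  | case2 l ls hl ih =>
    intro s hs
    rw [pvSections, hl] at hs
    exact ih s hs
  | case3 l ls lab hl ih =>
    intro s hs
    rw [pvSections, hl] at hs
    rcases List.mem_cons.mp hs with h' | h'
    · subst h'
      have := hl
      simp only [pvLabelOf] at this
      split_ifs at this with _ _
      · exact Or.inl (Option.some.inj this).symm
      · exact Or.inr (Option.some.inj this).symm
    · exact ih s h'

theorem pvE_open (b lab : String) (ls : List String) :
    pvE b (some lab) ls =
      (if lab = b then (ls.takeWhile (fun x => (pvLabelOf x).isNone)).filterMap pvEntryB? else [])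
        ++ pvE b none (ls.dropWhile (fun x => (pvLabelOf x).isNone)) := by
  induction ls with
  | nil => simp [pvE]
  | cons l ls ih =>
    cases hl : pvLabelOf l with
    | none =>
      simp only [pvE, List.takeWhile_cons, List.dropWhile_cons, hl, Option.isNone_none,
        if_true]
      rw [ih]
      by_cases hb : lab = b
      · simp [hb, List.filterMap_cons]
        cases he : pvEntryB? l <;> simp
      · simp [hb]
    | some lab' =>
      simp [pvE, hl]

theorem pvE_sections (b : String) (ls : List String) :
    pvE b none ls = pvC b (pvSections ls) := by
  induction ls using pvSections.induct with
  | case1 => simp [pvE, pvSections, pvC]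
  | case2 l ls hl ih =>
    rw [pvSections, hl]
    simp only [pvE, hl]
    simpa using ih
  | case3 l ls lab hl ih =>
    rw [pvSections, hl]
    simp only [pvE, hl, pvC]
    rw [pvE_open, ih]

-- ===== VERDICT (by name: the statement is the Claim_ definition above) =====
theorem parse_subtitle_info_spec : Claim_equal_parse_subtitle_info := by
  intro output _hdom
  unfold Spec_parse_subtitle_info parse_subtitle_info parse_subtitle_info_alt
  rw [pvALoop_eq, pvBLoop_eq _ (pvSections_labels _)]
  simp [pvStateLab, pvE_sections]
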